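-- pv_equiv track=rewrite | github.com/solomon-spec/A2SV | 2140-solving-questions-with-brainpower/2140-solving-questions-with-brainpower.py | mostPoints
-- ===== SOURCE A (Python) =====
-- from typing import List
--
-- def mostPoints(questions: List[List[int]]) -> int:
--     arr = [0]*(len(questions) + 1)
--     for i in range(len(arr)-2,-1,-1):
--         if questions[i][1] + i + 1 < len(arr):
--             arr[i] = max(arr[i+1],arr[i+questions[i][1]+1] + questions[i][0])
--         else:
--             arr[i] = max(arr[i+1],questions[i][0])
--     return arr[0]
-- ===== SOURCE B (Python) =====
-- from typing import List
--
-- def mostPoints(questions: List[List[int]]) -> int: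
--     n = len(questions)
--     dp = [0] * (n + 1)
--     for i, q in enumerate(questions):
--         dp[i + 1] = max(dp[i + 1], dp[i])
--         j = min(i + q[1] + 1, n)
--         dp[j] = max(dp[j], dp[i] + q[0])
--     return dp[n]
-- ===== Notes on version B (the rewrite author's own statement) =====
-- stated objective: alternative
-- what changed: Replaced A's backward 'pull' DP (arr[i] built from two future cells, iterating i from n-1 down to 0) by a forward 'push' DP that iterates the questions left to right, propagates the skip value into dp[i+1] and pushes dp[i]+points into dp[min(i+brainpower+1,n)], returning dp[n].
-- outside the precondition, e.g. on mostPoints([[1, -1]]): A returns 1, B returns 0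
import Mathlib
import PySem

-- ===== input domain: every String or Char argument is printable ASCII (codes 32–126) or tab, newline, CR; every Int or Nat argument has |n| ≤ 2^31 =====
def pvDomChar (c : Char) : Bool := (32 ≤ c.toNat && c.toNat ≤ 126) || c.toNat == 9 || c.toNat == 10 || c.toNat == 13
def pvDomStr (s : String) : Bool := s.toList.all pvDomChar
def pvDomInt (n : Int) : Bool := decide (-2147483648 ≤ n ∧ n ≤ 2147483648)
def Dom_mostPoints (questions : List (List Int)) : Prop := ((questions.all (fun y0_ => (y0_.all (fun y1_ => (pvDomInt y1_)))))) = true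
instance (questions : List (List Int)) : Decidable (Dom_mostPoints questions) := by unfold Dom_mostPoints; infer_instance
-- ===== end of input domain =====

-- B replaces A's backward 'pull' DP by a forward 'push' DP (same O(n) cost, different decomposition).

-- ===== PORT A =====
-- loop body of A's backward for-loop (arr[i] pulled from arr[i+1] and arr[i+questions[i][1]+1])
def stepA (questions : List (List Int)) (arr : List Int) (i : Int) : List Int :=
  if PySem.List.pyGetD (PySem.List.pyGetD questions i []) 1 0 + i + 1 < PySem.List.len arr then
    PySem.List.pySetD arr i
      (max (PySem.List.pyGetD arr (i + 1) 0)
        (PySem.List.pyGetD arr (i + PySem.List.pyGetD (PySem.List.pyGetD questions i []) 1 0 + 1) 0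
          + PySem.List.pyGetD (PySem.List.pyGetD questions i []) 0 0))
  else
    PySem.List.pySetD arr i
      (max (PySem.List.pyGetD arr (i + 1) 0)
        (PySem.List.pyGetD (PySem.List.pyGetD questions i []) 0 0))

def mostPoints (questions : List (List Int)) : Int :=
  let arr : List Int := List.replicate (questions.length + 1) 0
  let arr2 := (PySem.List.pyRange (PySem.List.len arr - 2) (-1) (-1)).foldl (stepA questions) arr
  PySem.List.pyGetD arr2 0 0

-- ===== PORT B =====
-- loop body of B's forward for-loop: propagate the skip into dp[i+1], push solving into dp[min(i+q[1]+1,n)]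
def stepB (n : Int) (dp : List Int) (iq : Int × List Int) : List Int :=
  let dp1 := PySem.List.pySetD dp (iq.1 + 1)
      (max (PySem.List.pyGetD dp (iq.1 + 1) 0) (PySem.List.pyGetD dp iq.1 0))
  let j := min (iq.1 + PySem.List.pyGetD iq.2 1 0 + 1) n
  PySem.List.pySetD dp1 j
      (max (PySem.List.pyGetD dp1 j 0) (PySem.List.pyGetD dp1 iq.1 0 + PySem.List.pyGetD iq.2 0 0))

def mostPoints_alt (questions : List (List Int)) : Int :=
  let n : Int := PySem.List.len questions
  let dp : List Int := List.replicate (questions.length + 1) 0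
  let dp2 := (PySem.List.enumerate questions 0).foldl (stepB n) dp
  PySem.List.pyGetD dp2 n 0

-- ===== PRECONDITION & SPEC =====
-- Pre_ restricts to the task's natural domain (each question is [points, brainpower] with brainpower ≥ 0,
-- rows of length ≥ 2): on shorter rows both programs raise IndexError; on negative brainpower A's
-- negative-index wraparound reads (or IndexError) are accidental, and B reads other cells there.
def Pre_mostPoints (questions : List (List Int)) : Prop :=
  ∀ q ∈ questions, 2 ≤ q.length ∧ 0 ≤ q.getD 1 0
instance (questions : List (List Int)) : Decidable (Pre_mostPoints questions) := by
  unfold Pre_mostPoints; infer_instance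
def pvWitness_mostPoints : List (List Int) := [[3, 2], [4, 3], [4, 4], [2, 5]]
def Spec_mostPoints (questions : List (List Int)) (out : Int) : Prop := out = mostPoints_alt questions
instance (questions : List (List Int)) (out : Int) : Decidable (Spec_mostPoints questions out) := by unfold Spec_mostPoints; infer_instance

-- ===== CLAIM (what is proved, stated in full; the proofs are below) =====
def Claim_equal_mostPoints : Prop := ∀ (questions : List (List Int)), Dom_mostPoints questions → Pre_mostPoints questions → Spec_mostPoints questions (mostPoints questions)

-- ===== LEMMAS AND PROOFS =====

-- the i-th question, its points and its brainpower, and the clamped jump target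
def pvQ (qs : List (List Int)) (i : Nat) : List Int := qs.getD i []
def pvP (qs : List (List Int)) (i : Nat) : Int := (pvQ qs i).getD 0 0
def pvB (qs : List (List Int)) (i : Nat) : Int := (pvQ qs i).getD 1 0
def pvJ (qs : List (List Int)) (i : Nat) : Nat := min (i + 1 + (pvB qs i).toNat) qs.length

-- the mathematical backward recurrence; both ports are proved to compute pull qs 0
def pull (qs : List (List Int)) (i : Nat) : Int :=
  if _h : i < qs.length then
    max (pull qs (i + 1)) (pull qs (pvJ qs i) + pvP qs i)
  else 0
termination_by qs.length - i
decreasing_by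
  · omega
  · simp only [pvJ]; omega

lemma pull_stop (qs : List (List Int)) (i : Nat) (h : qs.length ≤ i) : pull qs i = 0 := by
  rw [pull]; simp [Nat.not_lt.mpr h]

lemma pull_rec (qs : List (List Int)) (i : Nat) (h : i < qs.length) :
    pull qs i = max (pull qs (i + 1)) (pull qs (pvJ qs i) + pvP qs i) := by
  rw [pull]; simp [h]

lemma pull_mono (qs : List (List Int)) (i : Nat) (h : i < qs.length) :
    pull qs (i + 1) ≤ pull qs i := by
  rw [pull_rec qs i h]; exact le_max_left _ _

lemma pre_b (qs : List (List Int)) (hPre : Pre_mostPoints qs) (k : Nat) (hk : k < qs.length) :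
    0 ≤ pvB qs k := by
  have e : qs.getD k [] = qs[k] := by
    rw [List.getD_eq_getElem?_getD, List.getElem?_eq_getElem hk]; rfl
  have := (hPre qs[k] (List.getElem_mem hk)).2
  unfold pvB pvQ
  rw [e]; exact this

lemma pvJ_bounds (qs : List (List Int)) (k : Nat) (hk : k < qs.length) :
    k + 1 ≤ pvJ qs k ∧ pvJ qs k ≤ qs.length := by
  unfold pvJ; omega

lemma getD_set_eq (l : List Int) (i : Nat) (v : Int) (h : i < l.length) :
    (l.set i v).getD i 0 = v := by
  simp [List.getD, h]

lemma getD_set_ne (l : List Int) (i j : Nat) (v : Int) (h : i ≠ j) :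
    (l.set i v).getD j 0 = l.getD j 0 := by
  simp [List.getD, h]

-- ===== A-side: the backward fold characterised =====

def Afold (qs : List (List Int)) (k : Nat) : List Int :=
  (PySem.List.pyRange (k : Int) (qs.length : Int) 1).foldr
    (fun x acc => stepA qs acc x) (List.replicate (qs.length + 1) 0)

lemma Afold_stop (qs : List (List Int)) (k : Nat) (h : qs.length ≤ k) :
    Afold qs k = List.replicate (qs.length + 1) 0 := by
  unfold Afold
  rw [PySem.List.pyRange_one_eq_nil (by exact_mod_cast h)]
  rfl

lemma Afold_rec (qs : List (List Int)) (k : Nat) (h : k < qs.length) :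
    Afold qs k = stepA qs (Afold qs (k + 1)) (k : Int) := by
  unfold Afold
  rw [PySem.List.pyRange_one_cons (by exact_mod_cast h)]
  rw [List.foldr_cons]
  norm_cast

lemma stepA_eq (qs : List (List Int)) (k : Nat) (hk : k < qs.length) (hb : 0 ≤ pvB qs k)
    (arr : List Int) (hlen : arr.length = qs.length + 1) (h0 : arr.getD qs.length 0 = 0) :
    stepA qs arr (k : Int) =
      arr.set k (max (arr.getD (k + 1) 0) (arr.getD (pvJ qs k) 0 + pvP qs k)) := by
  have eq : qs.getD k [] = qs[k] := by
    rw [List.getD_eq_getElem?_getD, List.getElem?_eq_getElem hk]; rfl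
  have hq : PySem.List.pyGetD qs (k : Int) [] = qs.getD k [] := by simp
  have hb' : PySem.List.pyGetD (qs.getD k []) 1 0 = pvB qs k := by
    simp [PySem.List.pyGetD_ofNat', pvB, pvQ]
  unfold stepA
  rw [hq, hb']
  have hlen' : PySem.List.len arr = ((qs.length : Int) + 1) := by
    rw [PySem.List.len_eq, hlen]; push_cast; ring
  rw [hlen']
  by_cases hc : pvB qs k + (k : Int) + 1 < (qs.length : Int) + 1
  · rw [if_pos hc]
    have hjv : pvJ qs k = k + 1 + (pvB qs k).toNat := by unfold pvJ; omega
    have hidx : (k : Int) + pvB qs k + 1 = ((pvJ qs k : Nat) : Int) := by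
      rw [hjv]; push_cast; omega
    have hkp1 : (k : Int) + 1 = ((k + 1 : Nat) : Int) := by push_cast; ring
    rw [hidx, hkp1, PySem.List.pyGetD_natCast, PySem.List.pyGetD_natCast,
        PySem.List.pySetD_natCast, PySem.List.pyGetD_ofNat']
    simp [pvP, pvQ]
  · rw [if_neg hc]
    have hjv : pvJ qs k = qs.length := by unfold pvJ; omega
    have hkp1 : (k : Int) + 1 = ((k + 1 : Nat) : Int) := by push_cast; ring
    rw [hkp1, PySem.List.pyGetD_natCast, PySem.List.pySetD_natCast, PySem.List.pyGetD_ofNat']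
    rw [hjv, h0]
    simp [pvP, pvQ]

lemma A_inv (qs : List (List Int)) (hPre : Pre_mostPoints qs) (k : Nat) :
    (Afold qs k).length = qs.length + 1 ∧
    (∀ t : Nat, (Afold qs k).getD t 0 = if k ≤ t then pull qs t else 0) := by
  by_cases hk : k < qs.length
  · obtain ⟨ihlen, ihget⟩ := A_inv qs hPre (k + 1)
    rw [Afold_rec qs k hk,
        stepA_eq qs k hk (pre_b qs hPre k hk) _ ihlen
          (by rw [ihget qs.length, if_pos (by omega), pull_stop qs qs.length le_rfl]),
        ihget (k + 1), ihget (pvJ qs k)]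
    obtain ⟨hj1, hj2⟩ := pvJ_bounds qs k hk
    rw [if_pos (le_refl (k + 1)), if_pos hj1]
    constructor
    · rw [List.length_set, ihlen]
    · intro t
      by_cases ht : t = k
      · subst ht
        rw [getD_set_eq _ _ _ (by omega), if_pos le_rfl, pull_rec qs t hk]
      · rw [getD_set_ne _ _ _ _ (fun h => ht h.symm), ihget t]
        by_cases h1 : k ≤ t
        · rw [if_pos (by omega), if_pos h1]
        · rw [if_neg (by omega), if_neg h1]
  · rw [Afold_stop qs k (by omega : qs.length ≤ k)]
    refine ⟨by simp, fun t => ?_⟩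
    have : (List.replicate (qs.length + 1) (0 : Int)).getD t 0 = 0 := by simp [List.getD]
    rw [this]
    by_cases h1 : k ≤ t
    · rw [if_pos h1, pull_stop qs t (by omega)]
    · rw [if_neg h1]
termination_by qs.length - k
decreasing_by omega

lemma A_eq (qs : List (List Int)) (hPre : Pre_mostPoints qs) : mostPoints qs = pull qs 0 := by
  show PySem.List.pyGetD
      ((PySem.List.pyRange (PySem.List.len (List.replicate (qs.length + 1) (0 : Int)) - 2)
          (-1) (-1)).foldl (stepA qs) (List.replicate (qs.length + 1) 0)) 0 0 = pull qs 0
  have h1 : PySem.List.len (List.replicate (qs.length + 1) (0 : Int)) - 2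
      = (qs.length : Int) - 1 := by
    simp [PySem.List.len_eq]; ring
  rw [h1, PySem.List.pyRange_neg_one_eq_reverse]
  have h2 : ((-1 : Int) + 1) = ((0 : Nat) : Int) := by norm_num
  have h3 : ((qs.length : Int) - 1 + 1) = (qs.length : Int) := by ring
  rw [h2, h3, List.foldl_reverse]
  have h4 : (PySem.List.pyRange ((0 : Nat) : Int) (qs.length : Int) 1).foldr
      (fun x acc => stepA qs acc x) (List.replicate (qs.length + 1) 0) = Afold qs 0 := rfl
  rw [h4, PySem.List.pyGetD_zero, (A_inv qs hPre 0).2 0, if_pos le_rfl]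

-- ===== B-side: suffix maximum G and the forward fold =====

def G (qs : List (List Int)) (dp : List Int) (k : Nat) : Int :=
  if _h : k < qs.length then
    max (dp.getD k 0 + pull qs k) (G qs dp (k + 1))
  else dp.getD qs.length 0 + pull qs qs.length
termination_by qs.length - k

lemma G_stop (qs : List (List Int)) (dp : List Int) (k : Nat) (h : qs.length ≤ k) :
    G qs dp k = dp.getD qs.length 0 + pull qs qs.length := by
  rw [G]; simp [Nat.not_lt.mpr h]

lemma G_rec (qs : List (List Int)) (dp : List Int) (k : Nat) (h : k < qs.length) :
    G qs dp k = max (dp.getD k 0 + pull qs k) (G qs dp (k + 1)) := by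
  rw [G]; simp [h]

lemma G_ge (qs : List (List Int)) (dp : List Int) (k t : Nat)
    (h1 : k ≤ t) (h2 : t ≤ qs.length) :
    dp.getD t 0 + pull qs t ≤ G qs dp k := by
  by_cases hk : k < qs.length
  · rw [G_rec qs dp k hk]
    rcases Nat.eq_or_lt_of_le h1 with rfl | hlt
    · exact le_max_left _ _
    · exact le_trans (G_ge qs dp (k + 1) t hlt h2) (le_max_right _ _)
  · have hkn : qs.length ≤ k := by omega
    have : t = qs.length := le_antisymm h2 (le_trans hkn h1)
    subst this
    rw [G_stop qs dp k hkn]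
termination_by qs.length - k
decreasing_by omega

lemma G_le (qs : List (List Int)) (dp : List Int) (k : Nat) (c : Int)
    (hkn : k ≤ qs.length)
    (hub : ∀ t, k ≤ t → t ≤ qs.length → dp.getD t 0 + pull qs t ≤ c) :
    G qs dp k ≤ c := by
  by_cases hk : k < qs.length
  · rw [G_rec qs dp k hk]
    exact max_le (hub k le_rfl (le_of_lt hk))
      (G_le qs dp (k + 1) c (by omega) (fun t ht htn => hub t (by omega) htn))
  · have hkeq : k = qs.length := by omega
    subst hkeq
    rw [G_stop qs dp qs.length le_rfl]
    exact hub qs.length le_rfl le_rfl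
termination_by qs.length - k
decreasing_by omega

lemma G_mono (qs : List (List Int)) (dp dp' : List Int) (k : Nat)
    (hkn : k ≤ qs.length)
    (h : ∀ t, k ≤ t → t ≤ qs.length → dp.getD t 0 ≤ dp'.getD t 0) :
    G qs dp k ≤ G qs dp' k := by
  by_cases hk : k < qs.length
  · rw [G_rec qs dp k hk, G_rec qs dp' k hk]
    apply max_le
    · have h1 := h k le_rfl (le_of_lt hk)
      have h2 : dp.getD k 0 + pull qs k ≤ dp'.getD k 0 + pull qs k := by omega
      exact le_trans h2 (le_max_left _ _)
    · exact le_trans (G_mono qs dp dp' (k + 1) (by omega) (fun t ht htn => h t (by omega) htn))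
        (le_max_right _ _)
  · have hkeq : k = qs.length := by omega
    subst hkeq
    rw [G_stop qs dp qs.length le_rfl, G_stop qs dp' qs.length le_rfl]
    have h1 := h qs.length le_rfl le_rfl
    omega
termination_by qs.length - k
decreasing_by omega

lemma G_zero_dp (qs : List (List Int)) (dp : List Int) (hdp : ∀ t, dp.getD t 0 = 0)
    (k : Nat) : G qs dp k = pull qs k := by
  by_cases hk : k < qs.length
  · rw [G_rec qs dp k hk, G_zero_dp qs dp hdp (k + 1), hdp k, zero_add,
      max_eq_left (pull_mono qs k hk)]
  · rw [G_stop qs dp k (by omega : qs.length ≤ k), hdp qs.length,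
      pull_stop qs qs.length le_rfl, pull_stop qs k (by omega : qs.length ≤ k)]
    ring
termination_by qs.length - k
decreasing_by omega

def Bfold (qs : List (List Int)) (k : Nat) : List Int :=
  (PySem.List.enumerate (qs.take k) 0).foldl (stepB (qs.length : Int))
    (List.replicate (qs.length + 1) 0)

lemma Bfold_succ (qs : List (List Int)) (k : Nat) (hk : k < qs.length) :
    Bfold qs (k + 1) = stepB (qs.length : Int) (Bfold qs k) ((k : Int), qs[k]) := by
  unfold Bfold
  rw [List.take_succ_eq_append_getElem hk, PySem.List.enumerate_append, List.foldl_append]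
  have hl : (qs.take k).length = k := List.length_take_of_le (le_of_lt hk)
  rw [hl]
  simp [PySem.List.enumerate_cons, PySem.List.enumerate_nil]

lemma stepB_eq (qs : List (List Int)) (k : Nat) (hk : k < qs.length) (hb : 0 ≤ pvB qs k)
    (dp : List Int) :
    stepB (qs.length : Int) dp ((k : Int), qs[k]) =
      (dp.set (k + 1) (max (dp.getD (k + 1) 0) (dp.getD k 0))).set (pvJ qs k)
        (max ((dp.set (k + 1) (max (dp.getD (k + 1) 0) (dp.getD k 0))).getD (pvJ qs k) 0)
             ((dp.set (k + 1) (max (dp.getD (k + 1) 0) (dp.getD k 0))).getD k 0 + pvP qs k)) := by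
  have eq : qs[k] = qs.getD k [] := by
    rw [List.getD_eq_getElem?_getD, List.getElem?_eq_getElem hk]; rfl
  have hb1 : PySem.List.pyGetD qs[k] 1 0 = pvB qs k := by
    rw [eq]; simp [PySem.List.pyGetD_ofNat', pvB, pvQ]
  have hp0 : PySem.List.pyGetD qs[k] 0 0 = pvP qs k := by
    rw [eq]; simp [PySem.List.pyGetD_zero, pvP, pvQ]
  have hkp1 : (k : Int) + 1 = ((k + 1 : Nat) : Int) := by push_cast; ring
  have hj : min ((k : Int) + pvB qs k + 1) ((qs.length : Int)) = ((pvJ qs k : Nat) : Int) := by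
    unfold pvJ; omega
  unfold stepB
  simp only [hb1, hp0, hkp1, hj, PySem.List.pyGetD_natCast, PySem.List.pySetD_natCast]

lemma stepB_inv (qs : List (List Int)) (k : Nat) (hk : k < qs.length) (hb : 0 ≤ pvB qs k)
    (dp : List Int) (hlen : dp.length = qs.length + 1) (hG : G qs dp k = pull qs 0) :
    (stepB (qs.length : Int) dp ((k : Int), qs[k])).length = qs.length + 1 ∧
    G qs (stepB (qs.length : Int) dp ((k : Int), qs[k])) (k + 1) = pull qs 0 := by
  rw [stepB_eq qs k hk hb dp]
  obtain ⟨hj1, hj2⟩ := pvJ_bounds qs k hk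
  set dp1 := dp.set (k + 1) (max (dp.getD (k + 1) 0) (dp.getD k 0)) with hdp1
  set dp2 := dp1.set (pvJ qs k) (max (dp1.getD (pvJ qs k) 0) (dp1.getD k 0 + pvP qs k))
    with hdp2
  have hlen1 : dp1.length = qs.length + 1 := by rw [hdp1, List.length_set, hlen]
  have hlen2 : dp2.length = qs.length + 1 := by rw [hdp2, List.length_set, hlen1]
  have f1 : dp1.getD k 0 = dp.getD k 0 := getD_set_ne _ _ _ _ (by omega)
  have f3 : dp1.getD (k + 1) 0 = max (dp.getD (k + 1) 0) (dp.getD k 0) :=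
    getD_set_eq _ _ _ (by omega)
  have f2 : ∀ t, t ≠ k + 1 → dp1.getD t 0 = dp.getD t 0 :=
    fun t ht => getD_set_ne _ _ _ _ (fun h => ht h.symm)
  have f5 : dp2.getD (pvJ qs k) 0 = max (dp1.getD (pvJ qs k) 0) (dp.getD k 0 + pvP qs k) := by
    rw [hdp2, getD_set_eq _ _ _ (by omega), f1]
  have f4 : ∀ t, t ≠ pvJ qs k → dp2.getD t 0 = dp1.getD t 0 :=
    fun t ht => getD_set_ne _ _ _ _ (fun h => ht h.symm)
  have bt : ∀ t, k ≤ t → t ≤ qs.length → dp.getD t 0 + pull qs t ≤ pull qs 0 := by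
    intro t h1 h2; rw [← hG]; exact G_ge qs dp k t h1 h2
  have hpk := pull_rec qs k hk
  have hex1 : dp.getD k 0 + pull qs (k + 1) ≤ pull qs 0 := by
    have h1 := pull_mono qs k hk
    have h2 := bt k le_rfl (le_of_lt hk)
    omega
  have hex2 : dp.getD k 0 + pvP qs k + pull qs (pvJ qs k) ≤ pull qs 0 := by
    have h1 : pull qs (pvJ qs k) + pvP qs k ≤ pull qs k := by rw [hpk]; exact le_max_right _ _
    have h2 := bt k le_rfl (le_of_lt hk)
    omega
  refine ⟨hlen2, le_antisymm ?_ ?_⟩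
  · -- G dp2 (k+1) ≤ pull 0
    apply G_le qs _ (k + 1) (pull qs 0) (by omega)
    intro t h1 h2
    by_cases htj : t = pvJ qs k
    · subst htj
      rw [f5]
      by_cases htk : pvJ qs k = k + 1
      · rw [htk] at f5 h2 ⊢
        rw [f3]
        have b1 := bt (k + 1) (by omega) h2
        have b2 := hex1
        have b3 := hex2
        rw [htk] at b3
        omega
      · rw [f2 _ htk]
        have b1 := bt (pvJ qs k) (by omega) hj2
        have b3 := hex2
        omega
    · rw [f4 t htj]
      by_cases htk : t = k + 1
      · subst htk
        rw [f3]
        have b1 := bt (k + 1) (by omega) h2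
        have b2 := hex1
        omega
      · rw [f2 t htk]
        exact bt t (by omega) h2
  · -- pull 0 ≤ G dp2 (k+1)
    rw [← hG, G_rec qs dp k hk]
    apply max_le
    · -- dp[k] + pull k ≤ G dp2 (k+1)
      rw [hpk]
      have c1 : dp.getD k 0 + pull qs (k + 1) ≤ G qs dp2 (k + 1) := by
        have hd : dp.getD k 0 ≤ dp2.getD (k + 1) 0 := by
          by_cases htj : k + 1 = pvJ qs k
          · rw [← htj] at f5
            rw [f5, f3]
            omega
          · rw [f4 _ htj, f3]
            omega
        have h1 : dp.getD k 0 + pull qs (k + 1) ≤ dp2.getD (k + 1) 0 + pull qs (k + 1) := by omega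
        exact le_trans h1 (G_ge qs dp2 (k + 1) (k + 1) le_rfl (by omega))
      have c2 : dp.getD k 0 + (pull qs (pvJ qs k) + pvP qs k) ≤ G qs dp2 (k + 1) := by
        have hd : dp.getD k 0 + pvP qs k ≤ dp2.getD (pvJ qs k) 0 := by rw [f5]; omega
        have h1 : dp.getD k 0 + (pull qs (pvJ qs k) + pvP qs k)
            ≤ dp2.getD (pvJ qs k) 0 + pull qs (pvJ qs k) := by omega
        exact le_trans h1 (G_ge qs dp2 (k + 1) (pvJ qs k) hj1 hj2)
      calc dp.getD k 0 + max (pull qs (k + 1)) (pull qs (pvJ qs k) + pvP qs k)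
          = max (dp.getD k 0 + pull qs (k + 1))
              (dp.getD k 0 + (pull qs (pvJ qs k) + pvP qs k)) := by
            rw [max_add_add_left]
        _ ≤ G qs dp2 (k + 1) := max_le c1 c2
    · -- G dp (k+1) ≤ G dp2 (k+1)
      apply G_mono qs _ _ (k + 1) (by omega)
      intro t h1 h2
      by_cases htj : t = pvJ qs k
      · subst htj
        rw [f5]
        by_cases htk : pvJ qs k = k + 1
        · rw [htk, f3]; omega
        · rw [f2 _ htk]; omega
      · rw [f4 t htj]
        by_cases htk : t = k + 1
        · subst htk; rw [f3]; omega
        · rw [f2 t htk]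

lemma B_inv (qs : List (List Int)) (hPre : Pre_mostPoints qs) (k : Nat) (hk : k ≤ qs.length) :
    (Bfold qs k).length = qs.length + 1 ∧ G qs (Bfold qs k) k = pull qs 0 := by
  induction k with
  | zero =>
    refine ⟨by simp [Bfold], ?_⟩
    have : Bfold qs 0 = List.replicate (qs.length + 1) 0 := by
      simp [Bfold, PySem.List.enumerate_nil]
    rw [this, G_zero_dp qs _ (fun t => by simp [List.getD]) 0]
  | succ k ih =>
    have hklt : k < qs.length := by omega
    obtain ⟨ihlen, ihG⟩ := ih (by omega)
    rw [Bfold_succ qs k hklt]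
    exact stepB_inv qs k hklt (pre_b qs hPre k hklt) _ ihlen ihG

lemma B_eq (qs : List (List Int)) (hPre : Pre_mostPoints qs) :
    mostPoints_alt qs = pull qs 0 := by
  obtain ⟨hlen, hG⟩ := B_inv qs hPre qs.length le_rfl
  have hfold : Bfold qs qs.length
      = (PySem.List.enumerate qs 0).foldl (stepB (qs.length : Int))
          (List.replicate (qs.length + 1) 0) := by
    unfold Bfold; rw [List.take_length]
  rw [G_stop qs _ qs.length le_rfl, pull_stop qs qs.length le_rfl, add_zero] at hG
  show PySem.List.pyGetD
      ((PySem.List.enumerate qs 0).foldl (stepB (PySem.List.len qs))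
        (List.replicate (qs.length + 1) 0)) (PySem.List.len qs) 0 = pull qs 0
  rw [PySem.List.len_eq, ← hfold, PySem.List.pyGetD_natCast]
  rw [hfold] at hG
  rw [hfold]
  exact hG

-- ===== VERDICT (by name: the statement is the Claim_ definition above) =====
theorem mostPoints_spec : Claim_equal_mostPoints := by
  intro qs _hDom hPre
  unfold Spec_mostPoints
  rw [A_eq qs hPre, B_eq qs hPre]
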